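-- pv_equiv track=rewrite | github.com/jpastolfi/python-studies | beginner/code_challenges/6.2.dictionaries_advanced_challenges/4.count_first_letter.py | count_first_letter
-- ===== SOURCE A (Python) =====
-- def count_first_letter(names):
--   occurrences = {}
--   for key in names.keys():
--     if key[0] not in occurrences:
--       occurrences[key[0]] = len(names[key])
--     else:
--       occurrences[key[0]] += len(names[key])
--
--   return occurrences
-- ===== SOURCE B (Python) =====
-- def count_first_letter(names):
--     # Repeated partition: peel off one leading letter at a time.
--     occurrences = {}
--     pending = list(names.items())
--     while pending:
--         letter = pending[0][0][0]
--         occurrences[letter] = sum(len(v) for k, v in pending if k[0] == letter)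
--         pending = [(k, v) for k, v in pending if k[0] != letter]
--     return occurrences
-- ===== Notes on version B (the rewrite author's own statement) =====
-- stated objective: alternative
-- what changed: Replaces A's single scan with per-key conditional dict updates by a repeated-partition grouping: peel off the first pending key's leading letter, sum the lengths of all values whose key shares that letter, and recurse on the remaining keys; Pre_ excludes duplicate keys (an association list with duplicates does not represent the Python dict argument) and empty-string keys (key[0] raises IndexError).
import Mathlib
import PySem

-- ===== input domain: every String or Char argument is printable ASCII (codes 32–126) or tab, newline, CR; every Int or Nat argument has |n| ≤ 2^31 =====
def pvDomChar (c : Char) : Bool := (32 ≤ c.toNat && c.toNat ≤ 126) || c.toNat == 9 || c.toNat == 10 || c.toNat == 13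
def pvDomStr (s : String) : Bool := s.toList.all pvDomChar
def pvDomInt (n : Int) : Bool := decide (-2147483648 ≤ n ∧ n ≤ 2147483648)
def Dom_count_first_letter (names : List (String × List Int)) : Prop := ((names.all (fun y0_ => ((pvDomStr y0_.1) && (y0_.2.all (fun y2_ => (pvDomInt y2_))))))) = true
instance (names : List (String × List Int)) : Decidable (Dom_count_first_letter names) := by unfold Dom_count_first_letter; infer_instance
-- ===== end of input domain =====

-- B replaces A's single scan with conditional dict updates by a repeated-partition grouping
-- (peel off each leading letter with its total in turn); objective: alternative, not faster.

-- key[0] as a 1-character string; exact transliteration of Python's s[0] for s ≠ ""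
-- (Pre_ excludes empty keys, on which Python raises IndexError).
def firstLetter (s : String) : String := String.ofList (s.toList.take 1)

-- ===== PORT A =====
-- dict iteration = fold over the association list's keys; names[key] is a first-match
-- lookup in the full dict (always `some` since the key comes from names itself).
def count_first_letter (names : List (String × List Int)) : List (String × Int) :=
  (names.foldl
    (fun occ kv =>
      let letter := firstLetter kv.1
      let n : Int := ((((PySem.Dict.mk names).get? kv.1).getD []).length : Int)
      if occ.contains letter = false then occ.insert letter n
      else occ.modify letter 0 (· + n))
    PySem.Dict.empty).items

-- ===== PORT B =====
-- the while-loop over `pending`: emit (letter, total over matching keys), drop them, recurse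
def altLoop : List (String × List Int) → List (String × Int)
  | [] => []
  | kv :: rest =>
      let letter := firstLetter kv.1
      let pending := kv :: rest
      (letter, ((pending.filter (fun p => firstLetter p.1 == letter)).map
                  (fun p => (p.2.length : Int))).sum)
        :: altLoop (pending.filter (fun p => firstLetter p.1 != letter))
  termination_by l => l.length
  decreasing_by
    simp only [List.filter_cons, bne_self_eq_false, Bool.false_eq_true, if_false]
    exact Nat.lt_succ_of_le (List.length_filter_le _ _)

def count_first_letter_alt (names : List (String × List Int)) : List (String × Int) :=
  altLoop names

-- ===== PRECONDITION & SPEC =====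
-- Pre_ excludes (a) duplicate keys, which cannot occur in the Python dict argument (an
-- association list with duplicates does not represent a dict), and (b) empty-string keys,
-- on which A (and B) raise IndexError at key[0].
def Pre_count_first_letter (names : List (String × List Int)) : Prop :=
  (names.map Prod.fst).Nodup ∧ ∀ kv ∈ names, kv.1 ≠ ""
instance (names : List (String × List Int)) : Decidable (Pre_count_first_letter names) := by
  unfold Pre_count_first_letter; infer_instance

def pvWitness_count_first_letter : (List (String × List Int)) :=
  [("anna", [1, 2]), ("bob", [3]), ("alice", [])]

def Spec_count_first_letter (names : List (String × List Int)) (out : List (String × Int)) : Prop := out = count_first_letter_alt names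
instance (names : List (String × List Int)) (out : List (String × Int)) : Decidable (Spec_count_first_letter names out) := by unfold Spec_count_first_letter; infer_instance

-- ===== CLAIM (what is proved, stated in full; the proofs are below) =====
def Claim_equal_count_first_letter : Prop := ∀ (names : List (String × List Int)), Dom_count_first_letter names → Pre_count_first_letter names → Spec_count_first_letter names (count_first_letter names)

-- ===== LEMMAS AND PROOFS =====

-- A's fold step, with the dict lookup replaced by the pair's own value (equal under Nodup keys)
def stepV (occ : PySem.Dict String Int) (kv : String × List Int) : PySem.Dict String Int :=
  let letter := firstLetter kv.1
  let n : Int := (kv.2.length : Int)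
  if occ.contains letter = false then occ.insert letter n
  else occ.modify letter 0 (· + n)

def sumLetter (c : String) (l : List (String × List Int)) : Int :=
  ((l.filter (fun p => firstLetter p.1 == c)).map (fun p => (p.2.length : Int))).sum

lemma lookup_eq (names : List (String × List Int))
    (hnd : (names.map Prod.fst).Nodup) {kv : String × List Int} (h : kv ∈ names) :
    (PySem.Dict.mk names).get? kv.1 = some kv.2 := by
  apply PySem.Dict.get?_of_mem_items (PySem.Dict.mk names) (k := kv.1) (v := kv.2)
  · exact h
  · simpa [PySem.Dict.keys] using hnd

lemma stepV_cons_ne (c : String) (m : Int) (rest : List (String × Int))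
    (kv : String × List Int) (h : firstLetter kv.1 ≠ c) :
    (stepV (PySem.Dict.mk ((c, m) :: rest)) kv).items
      = (c, m) :: (stepV (PySem.Dict.mk rest) kv).items := by
  have hcc : (c == firstLetter kv.1) = false := by simp [Ne.symm h]
  simp only [stepV, PySem.Dict.contains, PySem.Dict.insert, PySem.Dict.modify,
    PySem.Dict.getD, PySem.Dict.get?, List.any_cons, hcc,
    List.find?_cons, Bool.false_or]
  split_ifs <;> simp_all

lemma stepV_cons_eq (c : String) (m : Int) (rest : List (String × Int))
    (kv : String × List Int) (h : firstLetter kv.1 = c)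
    (hc : ∀ p ∈ rest, p.1 ≠ c) :
    stepV (PySem.Dict.mk ((c, m) :: rest)) kv
      = PySem.Dict.mk ((c, m + (kv.2.length : Int)) :: rest) := by
  have h1 : (PySem.Dict.mk ((c, m) :: rest)).contains c = true := by
    simp [PySem.Dict.contains]
  have h2 : (PySem.Dict.mk ((c, m) :: rest)).getD c 0 = m := by
    simp [PySem.Dict.getD, PySem.Dict.get?]
  simp only [stepV, h, h1, Bool.true_eq_false, if_false, PySem.Dict.modify, h2,
    PySem.Dict.insert, if_true]
  apply PySem.Dict.ext
  simp only [List.map_cons, beq_self_eq_true, if_true]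
  congr 1
  rw [List.map_congr_left (g := id) (fun p hp => by simp [hc p hp]), List.map_id]

lemma stepV_keys_ne (rest : List (String × Int)) (kv : String × List Int) (c : String)
    (h : firstLetter kv.1 ≠ c) (hc : ∀ p ∈ rest, p.1 ≠ c) :
    ∀ p ∈ (stepV (PySem.Dict.mk rest) kv).items, p.1 ≠ c := by
  intro p hp
  simp only [stepV] at hp
  split_ifs at hp
  · rcases (PySem.Dict.mem_items_insert _ _ _ _).1 hp with rfl | ⟨hmem, _⟩
    · exact h
    · exact hc p hmem
  · rcases (PySem.Dict.mem_items_insert _ _ _ _).1 hp with rfl | ⟨hmem, _⟩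
    · exact h
    · exact hc p hmem

lemma foldV_cons (l : List (String × List Int)) :
    ∀ (c : String) (m : Int) (rest : List (String × Int)), (∀ p ∈ rest, p.1 ≠ c) →
    (l.foldl stepV (PySem.Dict.mk ((c, m) :: rest))).items
      = (c, m + sumLetter c l)
        :: ((l.filter (fun p => firstLetter p.1 != c)).foldl stepV (PySem.Dict.mk rest)).items := by
  induction l with
  | nil => intro c m rest hc; simp [sumLetter]
  | cons kv l ih =>
    intro c m rest hc
    by_cases h : firstLetter kv.1 = c
    · rw [List.foldl_cons, stepV_cons_eq c m rest kv h hc, ih c _ rest hc]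
      have hfe : (firstLetter kv.1 != c) = false := by simp [h]
      have hft : (firstLetter kv.1 == c) = true := by simp [h]
      simp only [List.filter_cons, hfe, Bool.false_eq_true, if_false, sumLetter, hft, if_true,
        List.map_cons, List.sum_cons]
      congr 2
      ring
    · rw [List.foldl_cons, PySem.Dict.ext (stepV_cons_ne c m rest kv h),
        ih c m _ (stepV_keys_ne rest kv c h hc)]
      have hfe : (firstLetter kv.1 != c) = true := by simp [h]
      have hft : (firstLetter kv.1 == c) = false := by simp [h]
      simp [hfe, sumLetter, hft]

lemma foldV_eq_altLoop : ∀ (n : Nat) (l : List (String × List Int)), l.length ≤ n →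
    (l.foldl stepV PySem.Dict.empty).items = altLoop l := by
  intro n
  induction n with
  | zero =>
    intro l hl
    rw [List.length_eq_zero_iff.1 (Nat.le_zero.1 hl), altLoop]
    rfl
  | succ n ih =>
    intro l hl
    match l with
    | [] => rw [altLoop]; rfl
    | kv :: rest =>
      have hstep : stepV PySem.Dict.empty kv
          = PySem.Dict.mk [(firstLetter kv.1, (kv.2.length : Int))] := by
        simp [stepV, PySem.Dict.empty, PySem.Dict.contains, PySem.Dict.insert]
      rw [List.foldl_cons, hstep,
        foldV_cons rest (firstLetter kv.1) _ [] (by intro p hp; simp at hp)]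
      have hfe : (firstLetter kv.1 != firstLetter kv.1) = false := by simp
      have hft : (firstLetter kv.1 == firstLetter kv.1) = true := by simp
      rw [altLoop]
      simp only [List.filter_cons, hfe, Bool.false_eq_true, if_false, hft, if_true,
        List.map_cons, List.sum_cons]
      exact congrArg₂ List.cons (by simp only [sumLetter])
        (ih _ (le_trans (List.length_filter_le _ _) (Nat.succ_le_succ_iff.1 hl)))

-- ===== VERDICT (by name: the statement is the Claim_ definition above) =====
theorem count_first_letter_spec : Claim_equal_count_first_letter := by
  intro names _ hpre
  unfold Spec_count_first_letter count_first_letter count_first_letter_alt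
  rw [PySem.List.foldl_congr_mem names _ stepV PySem.Dict.empty
    (by intro acc kv hkv
        simp only [stepV, lookup_eq names hpre.1 hkv, Option.getD_some])]
  exact foldV_eq_altLoop names.length names le_rfl
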